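-- pv_equiv track=rewrite | github.com/wannessels/sigrok-logicanalyzer-mcp | src/sigrok_logic_analyzer_mcp/formatters.py | format_uart_transactions
-- ===== SOURCE A (Python) =====
-- def _parse_annotations(raw_output: str) -> list[str]:
--     """Strip the decoder prefix (e.g. 'i2c-1: ') and return annotation values."""
--     annotations = []
--     for line in raw_output.strip().splitlines():
--         line = line.strip()
--         if not line:
--             continue
--         # Lines look like "i2c-1: Start" or "uart-1: 48"
--         _, _, value = line.partition(": ")
--         if value:
--             annotations.append(value)
--     return annotations
--
-- def format_uart_transactions(raw_output: str, max_bytes: int = 2000) -> str: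
--     """Group filtered UART annotations into TX/RX byte streams.
--
--     Expects output with rx-data and tx-data annotations.
--
--     Returns lines like:
--         TX> 48 65 6C 6C 6F  "Hello"
--         RX< 06              "."
--     """
--     annotations = _parse_annotations(raw_output)
--     if not annotations:
--         return "No UART data decoded."
--
--     # Group consecutive TX or RX bytes
--     segments: list[tuple[str, list[str]]] = []
--     current_dir = ""
--     current_bytes: list[str] = []
--
--     for ann in annotations:
--         # UART annotations: "TX data: XX" or "RX data: XX" or just hex value
--         direction = ""
--         value = ""
--         if ann.startswith("TX data"):
--             direction = "TX"
--             value = ann.split(": ", 1)[1] if ": " in ann else ""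
--         elif ann.startswith("RX data"):
--             direction = "RX"
--             value = ann.split(": ", 1)[1] if ": " in ann else ""
--         else:
--             continue
--
--         if direction != current_dir:
--             if current_bytes:
--                 segments.append((current_dir, current_bytes))
--             current_dir = direction
--             current_bytes = []
--         current_bytes.append(value.upper())
--
--     if current_bytes:
--         segments.append((current_dir, current_bytes))
--
--     total_bytes = sum(len(s[1]) for s in segments)
--     lines = [f"UART: {total_bytes} bytes in {len(segments)} segments", ""]
--
--     byte_count = 0
--     for direction, data in segments:
--         if byte_count >= max_bytes:
--             lines.append(f"\n... (truncated at {max_bytes} bytes)")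
--             break
--         prefix = "TX>" if direction == "TX" else "RX<"
--         hex_str = " ".join(data)
--         # Try to render as ASCII where possible
--         ascii_str = ""
--         try:
--             ascii_str = "".join(
--                 chr(int(b, 16)) if 0x20 <= int(b, 16) < 0x7F else "."
--                 for b in data
--             )
--         except ValueError:
--             pass
--         if ascii_str:
--             lines.append(f'{prefix} {hex_str}  "{ascii_str}"')
--         else:
--             lines.append(f"{prefix} {hex_str}")
--         byte_count += len(data)
--
--     return "\n".join(lines)
-- ===== SOURCE B (Python) =====
-- def format_uart_transactions(raw_output: str, max_bytes: int = 2000) -> str: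
--     """Staged rewrite: normalize into (direction, value) pairs, peel maximal
--     same-direction runs with two indices, then prefix-sum + zip/filter truncation."""
--     annotations = [v for line in raw_output.strip().splitlines()
--                    if (v := line.strip().partition(": ")[2])]
--     if not annotations:
--         return "No UART data decoded."
--
--     pairs = [p for p in map(_classify, annotations) if p is not None]
--
--     # Peel maximal same-direction runs with two indices (no flush-on-change state).
--     segments: list[tuple[str, list[str]]] = []
--     i = 0
--     while i < len(pairs):
--         j = i + 1
--         while j < len(pairs) and pairs[j][0] == pairs[i][0]:
--             j += 1
--         segments.append((pairs[i][0], [v for _, v in pairs[i:j]]))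
--         i = j
--
--     # Prefix sums of segment sizes; a segment is shown iff the bytes before it
--     # number fewer than max_bytes.
--     sizes = [len(data) for _, data in segments]
--     starts, t = [0], 0
--     for n in sizes:
--         t += n
--         starts.append(t)
--     shown = [seg for seg, s in zip(segments, starts) if s < max_bytes]
--
--     lines = [f"UART: {sum(sizes)} bytes in {len(segments)} segments", ""]
--     lines += [_render(d, data) for d, data in shown]
--     if len(shown) < len(segments):
--         lines.append(f"\n... (truncated at {max_bytes} bytes)")
--     return "\n".join(lines)
--
--
-- def _classify(ann):
--     if ann.startswith("TX data"):
--         return ("TX", ann.partition(": ")[2].upper())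
--     if ann.startswith("RX data"):
--         return ("RX", ann.partition(": ")[2].upper())
--     return None
--
--
-- def _hexval(b):
--     try:
--         return int(b, 16)
--     except ValueError:
--         return None
--
--
-- def _render(direction, data):
--     prefix = "TX>" if direction == "TX" else "RX<"
--     hex_str = " ".join(data)
--     vals = [_hexval(b) for b in data]
--     ascii_str = "" if None in vals else "".join(
--         chr(n) if 0x20 <= n < 0x7F else "." for n in vals)
--     return f'{prefix} {hex_str}  "{ascii_str}"' if ascii_str else f"{prefix} {hex_str}"
-- ===== Notes on version B (the rewrite author's own statement) =====
-- stated objective: alternative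
-- what changed: Replaces A's element-wise flush-on-change state machine and break-on-threshold output loop by staged passes: normalize annotations to (direction, value) pairs, peel maximal same-direction runs with a two-index scan, compute prefix sums of run sizes once, and select shown segments by zip/filter against those prefix sums with a conditional truncation line.
import Mathlib
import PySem

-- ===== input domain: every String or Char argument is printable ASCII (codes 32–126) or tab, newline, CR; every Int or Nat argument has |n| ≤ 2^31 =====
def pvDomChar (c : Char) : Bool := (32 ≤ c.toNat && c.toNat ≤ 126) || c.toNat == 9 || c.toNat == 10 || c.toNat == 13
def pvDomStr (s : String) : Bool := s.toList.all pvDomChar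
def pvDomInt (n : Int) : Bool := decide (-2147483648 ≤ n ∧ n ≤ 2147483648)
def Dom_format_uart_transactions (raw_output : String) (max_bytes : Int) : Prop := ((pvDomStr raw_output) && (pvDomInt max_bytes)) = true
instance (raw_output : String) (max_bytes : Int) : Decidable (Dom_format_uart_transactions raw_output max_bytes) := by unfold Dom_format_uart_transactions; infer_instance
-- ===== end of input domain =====

-- B replaces A's flush-on-change state machine by staged passes (normalize to pairs, peel maximal
-- runs with a two-index scan, prefix sums + zip/filter truncation); same return value (alternative).

-- shared low-level helper (the SAME Python expression occurs in both programs):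
-- the text after the first ": " , and "" when ": " is absent — this is both
-- `s.partition(": ")[2]` and `(s.split(": ", 1)[1] if ": " in s else "")` (exact: for an
-- absent separator partition's tail is "" and the guard yields ""; otherwise both are the
-- suffix after the first occurrence).
def pvAfter (s : String) : String :=
  if PySem.Str.isIn ": " s then
    match PySem.Str.splitMax? s ": " 1 with
    | some parts => (PySem.List.pyGet? parts 1).getD ""   -- ": " present ⇒ parts has ≥ 2 pieces; the default is never used
    | none => ""                                          -- unreachable: the separator ": " is nonempty
  else ""

-- `chr(int(b,16)) if 0x20 <= int(b,16) < 0x7F else "."` — Char.ofNat is exact for codepoints 32..126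
def pvChr (n : Int) : String :=
  if 32 ≤ n ∧ n < 127 then String.singleton (Char.ofNat n.toNat) else "."

-- ===== PORT A =====
def pvParseStepA (acc : List String) (line0 : String) : List String :=
  let line := PySem.Str.strip line0
  if line = "" then acc
  else if pvAfter line ≠ "" then acc ++ [pvAfter line] else acc

def pvParseA (raw : String) : List String :=
  (PySem.Str.splitlines (PySem.Str.strip raw)).foldl pvParseStepA []

def pvAApply (st : List (String × List String) × String × List String)
    (direction value : String) : List (String × List String) × String × List String :=
  let (segs, curDir, curBytes) := st
  let (segs, curDir, curBytes) :=
    if direction ≠ curDir then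
      ((if curBytes ≠ [] then segs ++ [(curDir, curBytes)] else segs), direction, ([] : List String))
    else (segs, curDir, curBytes)
  (segs, curDir, curBytes ++ [PySem.Str.upper value])

def pvAStep (st : List (String × List String) × String × List String) (ann : String) :
    List (String × List String) × String × List String :=
  if PySem.Str.startswith ann "TX data" then pvAApply st "TX" (pvAfter ann)
  else if PySem.Str.startswith ann "RX data" then pvAApply st "RX" (pvAfter ann)
  else st

def pvFinish (st : List (String × List String) × String × List String) :
    List (String × List String) :=
  if st.2.2 ≠ [] then st.1 ++ [(st.2.1, st.2.2)] else st.1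

-- the generator inside "".join(...): none = the ValueError the `try` catches
def pvAAscii : List String → Option String
  | [] => some ""
  | b :: rest =>
    match PySem.Int.ofStrBase? b 16 with
    | none => none
    | some n =>
      match pvAAscii rest with
      | none => none
      | some s => some (pvChr n ++ s)

def pvALine (direction : String) (data : List String) : String :=
  let pfx := if direction = "TX" then "TX>" else "RX<"
  let hexStr := PySem.Str.join " " data
  let asciiStr := (pvAAscii data).getD ""
  if asciiStr ≠ "" then pfx ++ " " ++ hexStr ++ "  \"" ++ asciiStr ++ "\""
  else pfx ++ " " ++ hexStr

def pvAEmit (max_bytes : Int) : List (String × List String) → Int → List String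
  | [], _ => []
  | (d, data) :: rest, byteCount =>
    if byteCount ≥ max_bytes then
      ["\n... (truncated at " ++ PySem.Int.toStr max_bytes ++ " bytes)"]
    else pvALine d data :: pvAEmit max_bytes rest (byteCount + (data.length : Int))

def format_uart_transactions (raw_output : String) (max_bytes : Int) : String :=
  let annotations := pvParseA raw_output
  if annotations = [] then "No UART data decoded."
  else
    let segments := pvFinish (annotations.foldl pvAStep ([], "", []))
    let total : Int := (segments.map (fun s => ((s.2).length : Int))).sum
    let lines := ["UART: " ++ PySem.Int.toStr total ++ " bytes in "
                    ++ PySem.Int.toStr (segments.length : Int) ++ " segments", ""]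
    PySem.Str.join "\n" (lines ++ pvAEmit max_bytes segments 0)

-- ===== PORT B =====
-- `[v for line in ... if (v := line.strip().partition(": ")[2])]`
def pvParseB (raw : String) : List String :=
  ((PySem.Str.splitlines (PySem.Str.strip raw)).map
      (fun l => pvAfter (PySem.Str.strip l))).filter (fun v => v ≠ "")

def pvClassify (ann : String) : Option (String × String) :=
  if PySem.Str.startswith ann "TX data" then some ("TX", PySem.Str.upper (pvAfter ann))
  else if PySem.Str.startswith ann "RX data" then some ("RX", PySem.Str.upper (pvAfter ann))
  else none

-- the two-index run peeling: the inner `while j < len and pairs[j][0] == pairs[i][0]` advance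
-- is takeWhile on the tail, `i = j` is the matching dropWhile
def pvRuns : List (String × String) → List (String × List String)
  | [] => []
  | p :: rest =>
    (p.1, p.2 :: (rest.takeWhile (fun q => q.1 == p.1)).map Prod.snd)
      :: pvRuns (rest.dropWhile (fun q => q.1 == p.1))
  termination_by l => l.length
  decreasing_by
    exact Nat.lt_succ_of_le (List.length_dropWhile_le _ _)

-- `starts, t = [0], 0; for n in sizes: t += n; starts.append(t)`
def pvStarts (sizes : List Int) : List Int :=
  (sizes.foldl (fun (st : List Int × Int) n => (st.1 ++ [st.2 + n], st.2 + n)) ([0], 0)).1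

def pvBVals (data : List String) : List (Option Int) :=
  data.map (fun b => PySem.Int.ofStrBase? b 16)

def pvRender (direction : String) (data : List String) : String :=
  let pfx := if direction = "TX" then "TX>" else "RX<"
  let hexStr := PySem.Str.join " " data
  let vals := pvBVals data
  let asciiStr := if (none : Option Int) ∈ vals then ""
    else PySem.Str.join "" (vals.map (fun o => pvChr (o.getD 0)))
  if asciiStr ≠ "" then pfx ++ " " ++ hexStr ++ "  \"" ++ asciiStr ++ "\""
  else pfx ++ " " ++ hexStr

def format_uart_transactions_alt (raw_output : String) (max_bytes : Int) : String :=
  let annotations := pvParseB raw_output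
  if annotations = [] then "No UART data decoded."
  else
    let pairs := (annotations.map pvClassify).filterMap id   -- `[p for p in map(_classify, ...) if p is not None]`
    let segments := pvRuns pairs
    let sizes := segments.map (fun p => ((p.2).length : Int))
    let shown := ((segments.zip (pvStarts sizes)).filter (fun p => decide (p.2 < max_bytes))).map Prod.fst
    let lines := ["UART: " ++ PySem.Int.toStr sizes.sum ++ " bytes in "
                    ++ PySem.Int.toStr (segments.length : Int) ++ " segments", ""]
    PySem.Str.join "\n"
      (lines ++ shown.map (fun p => pvRender p.1 p.2)
        ++ (if shown.length < segments.length then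
              ["\n... (truncated at " ++ PySem.Int.toStr max_bytes ++ " bytes)"]
            else []))

-- ===== PRECONDITION & SPEC =====
def Spec_format_uart_transactions (raw_output : String) (max_bytes : Int) (out : String) : Prop := out = format_uart_transactions_alt raw_output max_bytes
instance (raw_output : String) (max_bytes : Int) (out : String) : Decidable (Spec_format_uart_transactions raw_output max_bytes out) := by unfold Spec_format_uart_transactions; infer_instance

-- ===== CLAIM (what is proved, stated in full; the proofs are below) =====
def Claim_equal_format_uart_transactions : Prop := ∀ (raw_output : String) (max_bytes : Int), Dom_format_uart_transactions raw_output max_bytes → Spec_format_uart_transactions raw_output max_bytes (format_uart_transactions raw_output max_bytes)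

-- ===== LEMMAS AND PROOFS =====

lemma pvParse_fold (ls : List String) (acc : List String) :
    ls.foldl pvParseStepA acc
      = acc ++ (ls.map (fun l => pvAfter (PySem.Str.strip l))).filter (fun v => v ≠ "") := by
  induction ls generalizing acc with
  | nil => simp
  | cons l ls ih =>
    simp only [List.foldl_cons, List.map_cons, List.filter_cons, ih]
    by_cases h : PySem.Str.strip l = ""
    · have h2 : pvAfter "" = "" := by decide
      simp [pvParseStepA, h, h2]
    · by_cases h2 : pvAfter (PySem.Str.strip l) = ""
      · simp [pvParseStepA, h, h2]
      · simp [pvParseStepA, h, h2]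

lemma pvParse_eq (raw : String) : pvParseA raw = pvParseB raw := by
  unfold pvParseA pvParseB
  rw [pvParse_fold]
  simp

-- the element step of A's state machine on an already-classified pair
def pvStepP (st : List (String × List String) × String × List String)
    (p : String × String) : List (String × List String) × String × List String :=
  let (segs, curDir, curBytes) := st
  let (segs, curDir, curBytes) :=
    if p.1 ≠ curDir then
      ((if curBytes ≠ [] then segs ++ [(curDir, curBytes)] else segs), p.1, ([] : List String))
    else (segs, curDir, curBytes)
  (segs, curDir, curBytes ++ [p.2])

lemma pvAStep_classify (st : List (String × List String) × String × List String) (ann : String) :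
    pvAStep st ann = match pvClassify ann with
      | some p => pvStepP st p
      | none => st := by
  unfold pvAStep pvClassify
  split_ifs <;> simp [pvAApply, pvStepP]

lemma pvFold_filterMap (anns : List String)
    (st : List (String × List String) × String × List String) :
    anns.foldl pvAStep st = ((anns.map pvClassify).filterMap id).foldl pvStepP st := by
  induction anns generalizing st with
  | nil => rfl
  | cons a rest ih =>
    simp only [List.foldl_cons, List.map_cons, List.filterMap_cons, pvAStep_classify]
    cases h : pvClassify a with
    | none => simpa [h] using ih st
    | some p => simp only [id]; rw [List.foldl_cons]; exact ih _

-- prepend a pending run in front of a run list, merging with the head when directions agree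
def pvMerge (dir : String) (buf : List String) :
    List (String × List String) → List (String × List String)
  | [] => [(dir, buf)]
  | (d, vs) :: rest => if d = dir then (dir, buf ++ vs) :: rest else (dir, buf) :: (d, vs) :: rest

lemma pvRuns_cons (p : String × String) (ps : List (String × String)) :
    pvRuns (p :: ps) = pvMerge p.1 [p.2] (pvRuns ps) := by
  cases ps with
  | nil => simp [pvRuns, pvMerge]
  | cons q ps' =>
    by_cases h : q.1 = p.1
    · rw [pvRuns, pvRuns, pvMerge]
      simp [h]
    · rw [pvRuns]
      have hq : (q.1 == p.1) = false := by simp [h]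
      rw [List.takeWhile_cons, List.dropWhile_cons, hq]
      simp only [Bool.false_eq_true, if_false]
      rw [pvRuns, pvMerge]
      simp [fun he : q.1 = p.1 => h he]

lemma pvMerge_merge (dir : String) (buf : List String) (v : String)
    (gs : List (String × List String)) :
    pvMerge dir buf (pvMerge dir [v] gs) = pvMerge dir (buf ++ [v]) gs := by
  cases gs with
  | nil => simp [pvMerge]
  | cons g rest =>
    obtain ⟨d2, vs⟩ := g
    by_cases h : d2 = dir
    · simp [pvMerge, h]
    · simp [pvMerge, h]

lemma pvMerge_ne (dir : String) (buf : List String) (d v : String)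
    (gs : List (String × List String)) (h : d ≠ dir) :
    pvMerge dir buf (pvMerge d [v] gs) = (dir, buf) :: pvMerge d [v] gs := by
  cases gs with
  | nil => simp [pvMerge, h]
  | cons g rest =>
    obtain ⟨d2, vs⟩ := g
    by_cases h2 : d2 = d
    · simp [pvMerge, h2, h]
    · simp [pvMerge, h2, h]

lemma pvGroup_loop (pairs : List (String × String)) (segs : List (String × List String))
    (dir : String) (buf : List String) (h : buf ≠ []) :
    pvFinish (pairs.foldl pvStepP (segs, dir, buf)) = segs ++ pvMerge dir buf (pvRuns pairs) := by
  induction pairs generalizing segs dir buf with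
  | nil => simp [pvFinish, pvRuns, pvMerge, h]
  | cons p ps ih =>
    simp only [List.foldl_cons]
    rw [pvRuns_cons]
    by_cases hd : p.1 = dir
    · have hstep : pvStepP (segs, dir, buf) p = (segs, dir, buf ++ [p.2]) := by
        simp [pvStepP, hd]
      rw [hstep, ih segs dir _ (by simp), ← hd, pvMerge_merge, hd]
    · have hstep : pvStepP (segs, dir, buf) p = (segs ++ [(dir, buf)], p.1, [p.2]) := by
        simp [pvStepP, hd, h]
      rw [hstep, ih _ _ _ (by simp), pvMerge_ne dir buf p.1 p.2 _ hd]
      simp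

lemma pvGroup_eq (pairs : List (String × String)) :
    pvFinish (pairs.foldl pvStepP ([], "", [])) = pvRuns pairs := by
  cases pairs with
  | nil => simp [pvFinish, pvRuns]
  | cons p ps =>
    have hstep : pvStepP (([] : List (String × List String)), "", ([] : List String)) p
        = ([], p.1, [p.2]) := by
      by_cases hd : p.1 = ""
      · simp [pvStepP, hd]
      · simp [pvStepP, hd]
    rw [List.foldl_cons, hstep, pvGroup_loop ps [] p.1 [p.2] (by simp), pvRuns_cons]
    simp

lemma pvStarts_fold (sizes : List Int) (acc : List Int) (c : Int) :
    (sizes.foldl (fun (st : List Int × Int) n => (st.1 ++ [st.2 + n], st.2 + n)) (acc ++ [c], c)).1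
      = acc ++ List.scanl (· + ·) c sizes := by
  induction sizes generalizing acc c with
  | nil => simp
  | cons n ns ih =>
    simp only [List.foldl_cons, List.scanl_cons]
    have := ih (acc ++ [c]) (c + n)
    simpa using this

lemma pvStarts_eq (sizes : List Int) : pvStarts sizes = List.scanl (· + ·) 0 sizes := by
  unfold pvStarts
  simpa using pvStarts_fold sizes [] 0

lemma pvInter (a : List Char) (l : List (List Char)) :
    List.intercalate [] (a :: l) = a ++ List.intercalate [] l := by
  cases l with
  | nil => simp [List.intercalate]
  | cons b m => simp [List.intercalate]

-- "".join is plain concatenation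
lemma pvJoin_cons (x : String) (xs : List String) :
    PySem.Str.join "" (x :: xs) = x ++ PySem.Str.join "" xs := by
  rw [← String.toList_inj]
  simp [PySem.Chars.join, pvInter]

lemma pvAscii_vals (data : List String) :
    pvAAscii data = if (none : Option Int) ∈ pvBVals data then none
      else some (PySem.Str.join "" ((pvBVals data).map (fun o => pvChr (o.getD 0)))) := by
  induction data with
  | nil => simp [pvAAscii, pvBVals]; rfl
  | cons b rest ih =>
    cases hb : PySem.Int.ofStrBase? b 16 with
    | none =>
      have h1 : pvAAscii (b :: rest) = none := by simp [pvAAscii, hb]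
      have h2 : (none : Option Int) ∈ pvBVals (b :: rest) := by
        unfold pvBVals; rw [List.map_cons, hb]; exact List.mem_cons_self ..
      rw [h1, if_pos h2]
    | some n =>
      have h1 : pvAAscii (b :: rest) = match pvAAscii rest with
          | none => none
          | some s => some (pvChr n ++ s) := by simp [pvAAscii, hb]
      have h2 : pvBVals (b :: rest) = some n :: pvBVals rest := by
        unfold pvBVals; rw [List.map_cons, hb]
      rw [h1, ih, h2]
      by_cases hm : (none : Option Int) ∈ pvBVals rest
      · rw [if_pos hm, if_pos (List.mem_cons_of_mem _ hm)]
      · have hm2 : (none : Option Int) ∉ (some n :: pvBVals rest) := by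
          intro h
          rcases List.mem_cons.mp h with h | h
          · simp at h
          · exact hm h
        rw [if_neg hm, if_neg hm2, List.map_cons, pvJoin_cons]
        rfl

lemma pvLine_eq (d : String) (data : List String) : pvALine d data = pvRender d data := by
  unfold pvALine pvRender
  rw [pvAscii_vals]
  by_cases hm : (none : Option Int) ∈ pvBVals data
  · simp [hm]
  · simp [hm]

lemma pvShown_nil (max_bytes : Int) (segs : List (String × List String)) (c : Int)
    (hc : max_bytes ≤ c) :
    ((segs.zip (List.scanl (· + ·) c (segs.map (fun p => ((p.2).length : Int))))).filter
        (fun p => decide (p.2 < max_bytes))) = [] := by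
  induction segs generalizing c with
  | nil => simp
  | cons seg rest ih =>
    simp only [List.map_cons, List.scanl_cons, List.zip_cons_cons, List.filter_cons]
    have h1 : ¬ (c < max_bytes) := not_lt.mpr hc
    simp only [h1, decide_false]
    exact ih _ (le_trans hc (le_add_of_nonneg_right (Int.natCast_nonneg _)))

lemma pvEmit_eq (max_bytes : Int) (segs : List (String × List String)) (c : Int) :
    pvAEmit max_bytes segs c =
      (((segs.zip (List.scanl (· + ·) c (segs.map (fun p => ((p.2).length : Int))))).filter
          (fun p => decide (p.2 < max_bytes))).map Prod.fst).map (fun p => pvRender p.1 p.2)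
        ++ (if (((segs.zip (List.scanl (· + ·) c (segs.map (fun p => ((p.2).length : Int))))).filter
              (fun p => decide (p.2 < max_bytes))).map Prod.fst).length < segs.length then
              ["\n... (truncated at " ++ PySem.Int.toStr max_bytes ++ " bytes)"]
            else []) := by
  induction segs generalizing c with
  | nil => simp [pvAEmit]
  | cons seg rest ih =>
    obtain ⟨d, data⟩ := seg
    simp only [List.map_cons, List.scanl_cons, List.zip_cons_cons, List.filter_cons]
    by_cases hc : c ≥ max_bytes
    · have h1 : ¬ (c < max_bytes) := not_lt.mpr hc
      rw [pvAEmit]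
      simp only [hc, if_true, h1, decide_false]
      rw [pvShown_nil max_bytes rest _ (le_trans hc (le_add_of_nonneg_right (Int.natCast_nonneg _)))]
      simp
    · have h1 : (c < max_bytes) := lt_of_not_ge hc
      rw [pvAEmit]
      simp only [hc, if_false, h1, decide_true, List.length_cons]
      rw [pvLine_eq, ih]
      simp

-- ===== VERDICT (by name: the statement is the Claim_ definition above) =====
theorem format_uart_transactions_spec : Claim_equal_format_uart_transactions := by
  intro raw_output max_bytes _
  unfold Spec_format_uart_transactions format_uart_transactions format_uart_transactions_alt
  simp only [pvParse_eq, pvFold_filterMap, pvGroup_eq, pvStarts_eq, pvEmit_eq,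
    List.append_assoc]
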